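-- pv_equiv track=rewrite | github.com/egginabucket/grove | xml2abc_mod.py | brace_part
-- ===== SOURCE A (Python) =====
-- def brace_part(part: list[list[int]]):
--     """Put a brace on multistaff part and group voices."""
--     if not part:
--         return []  # empty part in the score
--     brace = []
--     for ivs in part:
--         if len(ivs) == 1:  # stave with one voice
--             brace.append(str(ivs[0]))
--         else:  # stave with multiple voices
--             brace += ["(", *list(map(str, ivs)), ")"]
--         brace.append("|")
--     del brace[-1]  # no barline at the end
--     if len(part) > 1:
--         brace = ["{", *brace, "}"]
--     return brace
-- ===== SOURCE B (Python) =====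
-- def brace_part(part: list[list[int]]):
--     """Put a brace on multistaff part and group voices."""
--     if not part:
--         return []
--     line = " | ".join(
--         str(ivs[0]) if len(ivs) == 1 else "( " + " ".join(map(str, ivs)) + " )"
--         for ivs in part
--     )
--     if len(part) > 1:
--         line = "{ " + line + " }"
--     return line.split()
-- ===== Notes on version B (the rewrite author's own statement) =====
-- stated objective: alternative
-- what changed: B renders the part through an intermediate string: each stave becomes one space-separated string, the staves are joined with ' | ', braces are added as '{ '/' }' prefixes, and the token list is recovered at the end by a single str.split(); A never leaves list-of-tokens representation and patches its trailing barline with del.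
import Mathlib
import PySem

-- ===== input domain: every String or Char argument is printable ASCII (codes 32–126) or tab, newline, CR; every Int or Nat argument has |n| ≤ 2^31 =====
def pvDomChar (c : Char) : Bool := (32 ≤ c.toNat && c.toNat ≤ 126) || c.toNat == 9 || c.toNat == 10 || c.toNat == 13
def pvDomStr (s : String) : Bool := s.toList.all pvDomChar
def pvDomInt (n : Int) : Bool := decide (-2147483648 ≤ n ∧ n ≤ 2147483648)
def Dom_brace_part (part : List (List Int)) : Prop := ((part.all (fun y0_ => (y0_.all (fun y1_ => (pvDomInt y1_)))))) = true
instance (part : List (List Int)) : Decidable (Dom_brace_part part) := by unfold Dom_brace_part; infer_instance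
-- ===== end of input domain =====

-- B renders the part through an intermediate space-separated STRING (stave strings
-- joined with " | ", brace added as "{ "/" }" text) and recovers the token list with
-- one final str.split(); A builds the token list directly and patches the trailing
-- barline with del. Objective: alternative (different intermediate representation).

set_option maxRecDepth 4096


-- ===== PORT A =====
def brace_part (part : List (List Int)) : List String :=
  if part = [] then []
  else
    let brace : List String := part.foldl (fun brace ivs =>
      (if ivs.length = 1 then
        -- ivs[0]: guarded by len == 1, never raises; .getD 0 is unreachable
        brace ++ [PySem.Int.toStr ((PySem.List.pyGet? ivs 0).getD 0)]
      else
        brace ++ "(" :: ivs.map PySem.Int.toStr ++ [")"]) ++ ["|"]) []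
    let brace := brace.dropLast   -- del brace[-1]
    if part.length > 1 then "{" :: brace ++ ["}"] else brace

-- ===== PORT B =====
-- one stave rendered as a single space-separated string
def bStave (ivs : List Int) : String :=
  if ivs.length = 1 then PySem.Int.toStr ((PySem.List.pyGet? ivs 0).getD 0)
  else "( " ++ PySem.Str.join " " (ivs.map PySem.Int.toStr) ++ " )"

def brace_part_alt (part : List (List Int)) : List String :=
  if part = [] then []
  else
    let line := PySem.Str.join " | " (part.map bStave)
    let line := if part.length > 1 then "{ " ++ line ++ " }" else line
    PySem.Str.split₀ line

-- ===== PRECONDITION & SPEC =====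
def Spec_brace_part (part : List (List Int)) (out : List String) : Prop := out = brace_part_alt part
instance (part : List (List Int)) (out : List String) : Decidable (Spec_brace_part part out) := by unfold Spec_brace_part; infer_instance

-- ===== CLAIM (what is proved, stated in full; the proofs are below) =====
def Claim_equal_brace_part : Prop := ∀ (part : List (List Int)), Dom_brace_part part → Spec_brace_part part (brace_part part)

-- ===== LEMMAS AND PROOFS =====

-- a word: nonempty, no whitespace characters
def NoSp (w : List Char) : Prop := w ≠ [] ∧ ∀ c ∈ w, PySem.Chars.isspace c = false

-- continuation shape at a word boundary: end of input or a space next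
def SpTail (rest : List Char) : Prop := rest = [] ∨ ∃ r, rest = ' ' :: r

-- the tokens of one stave, at char-list level
def gToks (ivs : List Int) : List (List Char) :=
  if ivs.length = 1 then [PySem.Int.toChars ((PySem.List.pyGet? ivs 0).getD 0)]
  else ['('] :: ivs.map PySem.Int.toChars ++ [[')']]

-- stave token groups joined with the '|' token
def sepToks : List (List (List Char)) → List (List Char)
  | [] => []
  | g :: t => g ++ t.flatMap (fun h => ['|'] :: h)

-- str(int) is a nonempty all-non-space word --------------------------------

lemma core_ne_nil : ∀ (f n : Nat) (l : List Char), l ≠ [] → Nat.toDigitsCore 10 f n l ≠ [] := by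
  intro f
  induction f with
  | zero => intro n l h; simpa [Nat.toDigitsCore]
  | succ f ih =>
    intro n l h
    simp only [Nat.toDigitsCore]
    split
    · simp
    · exact ih _ _ (by simp)

lemma toDigits_ne_nil (n : Nat) : Nat.toDigits 10 n ≠ [] := by
  unfold Nat.toDigits
  simp only [Nat.toDigitsCore]
  split
  · simp
  · exact core_ne_nil _ _ _ (by simp)

lemma core_mem : ∀ (f n : Nat) (l : List Char) (c : Char), c ∈ Nat.toDigitsCore 10 f n l →
    c ∈ l ∨ ∃ d, d < 10 ∧ c = Nat.digitChar d := by
  intro f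
  induction f with
  | zero => intro n l c h; left; simpa [Nat.toDigitsCore] using h
  | succ f ih =>
    intro n l c h
    simp only [Nat.toDigitsCore] at h
    split at h
    · rcases List.mem_cons.mp h with h | h
      · exact Or.inr ⟨n % 10, Nat.mod_lt _ (by norm_num), h⟩
      · exact Or.inl h
    · rcases ih _ _ _ h with h' | h'
      · rcases List.mem_cons.mp h' with h'' | h''
        · exact Or.inr ⟨n % 10, Nat.mod_lt _ (by norm_num), h''⟩
        · exact Or.inl h''
      · exact Or.inr h'

lemma digitChar_not_space (d : Nat) (hd : d < 10) : PySem.Chars.isspace (Nat.digitChar d) = false := by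
  interval_cases d <;> decide

lemma toDigits_no_space (n : Nat) : ∀ c ∈ Nat.toDigits 10 n, PySem.Chars.isspace c = false := by
  intro c hc
  rcases core_mem _ _ _ _ hc with h | ⟨d, hd, rfl⟩
  · simp at h
  · exact digitChar_not_space d hd

lemma toChars_noSp (n : Int) : NoSp (PySem.Int.toChars n) := by
  unfold PySem.Int.toChars NoSp
  split
  · refine ⟨by simp, ?_⟩
    intro c hc
    rcases List.mem_cons.mp hc with rfl | hc
    · decide
    · exact toDigits_no_space _ c hc
  · exact ⟨toDigits_ne_nil _, toDigits_no_space _⟩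

-- behaviour of split₀.go ---------------------------------------------------

lemma go_word (w : List Char) (hw : ∀ c ∈ w, PySem.Chars.isspace c = false) :
    ∀ (rest : List Char) (cur : List Char) (acc : List (List Char)),
      PySem.Chars.split₀.go (w ++ rest) cur acc = PySem.Chars.split₀.go rest (w.reverse ++ cur) acc := by
  induction w with
  | nil => intro rest cur acc; simp
  | cons c w ih =>
    intro rest cur acc
    have hc : PySem.Chars.isspace c = false := hw c (by simp)
    have hw' : ∀ c ∈ w, PySem.Chars.isspace c = false := fun c hc => hw c (by simp [hc])
    simp only [List.cons_append, PySem.Chars.split₀.go, hc, Bool.false_eq_true, if_false]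
    rw [ih hw']
    simp

lemma go_flush (rest : List Char) (h : SpTail rest) (cur : List Char) (acc : List (List Char)) :
    PySem.Chars.split₀.go rest cur acc
      = PySem.Chars.split₀.go rest [] (if cur.isEmpty then acc else cur.reverse :: acc) := by
  have hsp : PySem.Chars.isspace ' ' = true := by decide
  rcases h with rfl | ⟨r, rfl⟩
  · by_cases hc : cur.isEmpty
    · simp [PySem.Chars.split₀.go, hc]
    · simp [PySem.Chars.split₀.go, hc]
  · by_cases hc : cur.isEmpty
    · rw [List.isEmpty_iff.mp hc]
      simp [PySem.Chars.split₀.go, hsp]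
    · simp [PySem.Chars.split₀.go, hsp, hc]

lemma go_space (r : List Char) (acc : List (List Char)) :
    PySem.Chars.split₀.go (' ' :: r) [] acc = PySem.Chars.split₀.go r [] acc := by
  simp [PySem.Chars.split₀.go, show PySem.Chars.isspace ' ' = true from by decide]

lemma go_token (w : List Char) (hw : NoSp w) (rest : List Char) (h : SpTail rest) (acc : List (List Char)) :
    PySem.Chars.split₀.go (w ++ rest) [] acc = PySem.Chars.split₀.go rest [] (w :: acc) := by
  rw [go_word w hw.2, go_flush rest h]
  rcases hw with ⟨hne, -⟩
  simp [List.isEmpty_iff, hne]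

lemma go_char (c : Char) (hc : PySem.Chars.isspace c = false) (rest : List Char)
    (h : SpTail rest) (acc : List (List Char)) :
    PySem.Chars.split₀.go (c :: rest) [] acc = PySem.Chars.split₀.go rest [] ([c] :: acc) :=
  go_token [c] ⟨by simp, by simpa using hc⟩ rest h acc

lemma go_join (ws : List (List Char)) (hws : ∀ w ∈ ws, NoSp w) :
    ∀ (rest : List Char), SpTail rest → ∀ (acc : List (List Char)),
      PySem.Chars.split₀.go (PySem.Chars.join [' '] ws ++ rest) [] acc
        = PySem.Chars.split₀.go rest [] (ws.reverse ++ acc) := by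
  induction ws with
  | nil => intro rest _ acc; simp [PySem.Chars.join_nil]
  | cons w t ih =>
    intro rest hrest acc
    cases t with
    | nil =>
      rw [PySem.Chars.join_singleton, go_token w (hws w (by simp)) rest hrest]
      simp
    | cons v u =>
      rw [PySem.Chars.join_cons_cons]
      have hw : NoSp w := hws w (by simp)
      have ht : ∀ x ∈ v :: u, NoSp x := fun x hx => hws x (by simp [hx])
      have : (w ++ [' '] ++ PySem.Chars.join [' '] (v :: u)) ++ rest
          = w ++ (' ' :: (PySem.Chars.join [' '] (v :: u) ++ rest)) := by simp
      rw [this, go_token w hw _ (Or.inr ⟨_, rfl⟩), go_space, ih ht rest hrest]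
      simp

-- one stave string consumed by go ------------------------------------------

lemma go_stave (ivs : List Int) (rest : List Char) (hrest : SpTail rest) (acc : List (List Char)) :
    PySem.Chars.split₀.go ((bStave ivs).toList ++ rest) [] acc
      = PySem.Chars.split₀.go rest [] ((gToks ivs).reverse ++ acc) := by
  unfold bStave gToks
  split
  · rw [show (PySem.Int.toStr ((PySem.List.pyGet? ivs 0).getD 0)).toList
        = PySem.Int.toChars ((PySem.List.pyGet? ivs 0).getD 0) from PySem.Int.toList_toStr _]
    rw [go_token _ (toChars_noSp _) rest hrest]
    simp
  · have htoks : ∀ w ∈ ivs.map PySem.Int.toChars, NoSp w := by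
      intro w hw
      rcases List.mem_map.mp hw with ⟨n, -, rfl⟩
      exact toChars_noSp n
    have hmap : (ivs.map PySem.Int.toStr).map String.toList = ivs.map PySem.Int.toChars := by
      simp [List.map_map, Function.comp_def, PySem.Int.toList_toStr]
    have hchars : ("( " ++ PySem.Str.join " " (ivs.map PySem.Int.toStr) ++ " )").toList ++ rest
        = '(' :: (' ' :: (PySem.Chars.join [' '] (ivs.map PySem.Int.toChars) ++ (' ' :: (')' :: rest)))) := by
      have hsep : (" " : String).toList = [' '] := by decide
      have h1 : ("( " : String).toList = ['(', ' '] := by decide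
      have h2 : (" )" : String).toList = [' ', ')'] := by decide
      simp [h1, h2, hsep, hmap]
    rw [hchars, go_char '(' (by decide) _ (Or.inr ⟨_, rfl⟩), go_space,
        go_join _ htoks _ (Or.inr ⟨_, rfl⟩), go_space,
        go_char ')' (by decide) rest hrest]
    simp

-- the whole joined body consumed by go -------------------------------------

lemma go_body (p : List Int) (ps : List (List Int)) (rest : List Char) (hrest : SpTail rest)
    (acc : List (List Char)) :
    PySem.Chars.split₀.go (PySem.Chars.join [' ', '|', ' '] (((p :: ps).map bStave).map String.toList) ++ rest) [] acc
      = PySem.Chars.split₀.go rest [] ((sepToks ((p :: ps).map gToks)).reverse ++ acc) := by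
  induction ps generalizing p acc with
  | nil =>
    rw [List.map_cons, List.map_cons, List.map_nil, List.map_nil, PySem.Chars.join_singleton,
        go_stave p rest hrest]
    simp [sepToks]
  | cons q u ih =>
    have hq : ((p :: q :: u).map bStave).map String.toList
        = (bStave p).toList :: (bStave q).toList :: ((u.map bStave).map String.toList) := by
      simp
    rw [hq, PySem.Chars.join_cons_cons]
    have hq' : ((q :: u).map bStave).map String.toList
        = (bStave q).toList :: ((u.map bStave).map String.toList) := by simp
    have hre : ((bStave p).toList ++ [' ', '|', ' ']
          ++ PySem.Chars.join [' ', '|', ' '] ((bStave q).toList :: ((u.map bStave).map String.toList))) ++ rest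
        = (bStave p).toList ++ (' ' :: ('|' :: (' ' :: (PySem.Chars.join [' ', '|', ' '] (((q :: u).map bStave).map String.toList) ++ rest)))) := by
      rw [hq']
      simp
    rw [hre, go_stave p _ (Or.inr ⟨_, rfl⟩), go_space,
        go_char '|' (by decide) _ (Or.inr ⟨_, rfl⟩), go_space, ih q]
    have hsep : sepToks ((p :: q :: u).map gToks) = gToks p ++ ['|'] :: sepToks ((q :: u).map gToks) := by
      simp [sepToks]
    rw [hsep]
    simp

-- A's loop and its trailing-barline deletion -------------------------------

lemma a_fold (l : List (List Int)) (acc : List String) :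
    l.foldl (fun brace ivs =>
      (if ivs.length = 1 then
        brace ++ [PySem.Int.toStr ((PySem.List.pyGet? ivs 0).getD 0)]
      else
        brace ++ "(" :: ivs.map PySem.Int.toStr ++ [")"]) ++ ["|"]) acc
    = acc ++ l.flatMap (fun ivs => (gToks ivs).map String.ofList ++ ["|"]) := by
  induction l generalizing acc with
  | nil => simp
  | cons x xs ih =>
    rw [List.foldl_cons, ih]
    unfold gToks
    split <;> rename_i h <;> simp [h, PySem.Int.toStr, List.map_map, Function.comp_def]

lemma a_dropLast (g0 : List (List Char)) (gs : List (List (List Char))) :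
    (((g0 :: gs).flatMap (fun g => g.map String.ofList ++ ["|"]))).dropLast
      = (sepToks (g0 :: gs)).map String.ofList := by
  induction gs generalizing g0 with
  | nil => simp [sepToks]
  | cons g t ih =>
    have h1 : ((g0 :: g :: t).flatMap (fun g => g.map String.ofList ++ ["|"]))
        = ((g0 ++ ['|'] :: g) :: t).flatMap (fun g => g.map String.ofList ++ ["|"]) := by
      simp
    rw [h1, ih]
    have h2 : sepToks ((g0 ++ ['|'] :: g) :: t) = sepToks (g0 :: g :: t) := by
      cases t <;> simp [sepToks]
    rw [h2]

-- ===== VERDICT (by name: the statement is the Claim_ definition above) =====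

theorem brace_part_spec : Claim_equal_brace_part := by
  intro part _
  unfold Spec_brace_part brace_part brace_part_alt
  cases part with
  | nil => simp
  | cons p ps =>
    simp only [if_neg (List.cons_ne_nil p ps)]
    rw [a_fold, List.nil_append, List.flatMap_cons]
    have hA : (((gToks p).map String.ofList ++ ["|"]) ++ ps.flatMap (fun ivs => (gToks ivs).map String.ofList ++ ["|"]))
        = (p :: ps).flatMap (fun g => (gToks g).map String.ofList ++ ["|"]) := by simp
    rw [hA]
    have hAmap : (p :: ps).flatMap (fun g => (gToks g).map String.ofList ++ ["|"])
        = ((p :: ps).map gToks).flatMap (fun g => g.map String.ofList ++ ["|"]) := by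
      rw [List.flatMap_map]
    rw [hAmap, List.map_cons (f := gToks), a_dropLast, ← List.map_cons (f := gToks)]
    -- B side: split₀ of the assembled line
    have hsplit : ∀ s : String, PySem.Str.split₀ s = (PySem.Chars.split₀ s.toList).map String.ofList :=
      fun s => rfl
    by_cases hlen : (p :: ps).length > 1
    · simp only [hlen, if_true]
      rw [hsplit]
      have hline : ("{ " ++ PySem.Str.join " | " ((p :: ps).map bStave) ++ " }").toList
          = '{' :: (' ' :: (PySem.Chars.join [' ', '|', ' '] (((p :: ps).map bStave).map String.toList) ++ (' ' :: ('}' :: [])))) := by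
        have h1 : ("{ " : String).toList = ['{', ' '] := by decide
        have h2 : (" }" : String).toList = [' ', '}'] := by decide
        have h3 : (" | " : String).toList = [' ', '|', ' '] := by decide
        simp [h1, h2, h3]
      rw [hline]
      unfold PySem.Chars.split₀
      rw [go_char '{' (by decide) _ (Or.inr ⟨_, rfl⟩), go_space,
          go_body p ps _ (Or.inr ⟨_, rfl⟩), go_space,
          go_char '}' (by decide) [] (Or.inl rfl)]
      simp only [PySem.Chars.split₀.go, List.isEmpty_nil, if_true]
      simp
    · simp only [hlen, if_false]
      rw [hsplit]
      have hline : (PySem.Str.join " | " ((p :: ps).map bStave)).toList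
          = PySem.Chars.join [' ', '|', ' '] (((p :: ps).map bStave).map String.toList) ++ [] := by
        have h3 : (" | " : String).toList = [' ', '|', ' '] := by decide
        simp [h3]
      rw [hline]
      unfold PySem.Chars.split₀
      rw [go_body p ps [] (Or.inl rfl)]
      simp [PySem.Chars.split₀.go]
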